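-- pv_equiv track=rewrite | github.com/dumetum/pythonkurs | Loesungen/09_uebung_parameteruebergabe/parameteruebergabe.py | ersetze
-- ===== SOURCE A (Python) =====
-- def ersetze(liste):
--     anzahl = 0
--     index = 0
--     for element in liste:
--         if element == 8:
--             liste[index] = 16
--             anzahl = anzahl + 1
--         index = index + 1
--     return anzahl
-- ===== SOURCE B (Python) =====
-- def ersetze(liste):
--     # Count first, then replace in a separate pass (same in-place mutation as A).
--     anzahl = liste.count(8)
--     for i, v in enumerate(liste):
--         if v == 8:
--             liste[i] = 16
--     return anzahl
-- ===== Notes on version B (the rewrite author's own statement) =====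
-- stated objective: alternative
-- what changed: Replaces A's single interleaved count-and-replace loop (manual index and counter) with a two-pass structure: count the 8s up front with list.count, then a separate enumerate pass performs the in-place replacement.
import Mathlib
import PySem

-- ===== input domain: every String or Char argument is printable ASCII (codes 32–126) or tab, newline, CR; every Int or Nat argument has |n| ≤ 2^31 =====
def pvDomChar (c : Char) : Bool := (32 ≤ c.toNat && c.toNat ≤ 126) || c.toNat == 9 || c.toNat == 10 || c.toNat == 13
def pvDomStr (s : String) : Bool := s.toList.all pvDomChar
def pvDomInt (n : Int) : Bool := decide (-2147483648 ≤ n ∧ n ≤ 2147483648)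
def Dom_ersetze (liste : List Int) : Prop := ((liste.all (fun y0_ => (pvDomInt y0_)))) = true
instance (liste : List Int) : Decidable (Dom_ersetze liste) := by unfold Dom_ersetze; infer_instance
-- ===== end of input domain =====

-- B changes the decomposition only (count first, then a separate replacement pass); A mutates
-- its argument in place, B performs the same mutation in Python, and the equivalence proved
-- here is about the RETURN value.

-- ===== PORT A =====
-- A's `for element in liste` with in-place writes at the current index: modelled as an index
-- loop over the live (mutated) list, exactly as CPython's list iterator behaves.
def ersetzeLoop (l : List Int) (anzahl : Int) (i : Nat) : Int :=
  if h : i < l.length then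
    let element := l[i]
    if element == 8 then
      ersetzeLoop (l.set i 16) (anzahl + 1) (i + 1)
    else
      ersetzeLoop l anzahl (i + 1)
  else anzahl
termination_by l.length - i
decreasing_by
  · simp only [List.length_set]; omega
  · omega

def ersetze (liste : List Int) : Int := ersetzeLoop liste 0 0

-- ===== PORT B =====
def ersetze_alt (liste : List Int) : Int :=
  let anzahl : Int := (PySem.List.count liste 8 : Int)
  let _mutated := liste.map (fun v => if v == 8 then (16 : Int) else v)  -- the in-place pass (return value unused)
  anzahl

-- ===== PRECONDITION & SPEC =====
def Spec_ersetze (liste : List Int) (out : Int) : Prop := out = ersetze_alt liste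
instance (liste : List Int) (out : Int) : Decidable (Spec_ersetze liste out) := by unfold Spec_ersetze; infer_instance

-- ===== CLAIM (what is proved, stated in full; the proofs are below) =====
def Claim_equal_ersetze : Prop := ∀ (liste : List Int), Dom_ersetze liste → Spec_ersetze liste (ersetze liste)

-- ===== LEMMAS AND PROOFS =====
theorem ersetzeLoop_eq (l : List Int) (anzahl : Int) (i : Nat) :
    ersetzeLoop l anzahl i = anzahl + ((l.drop i).count 8 : Int) := by
  induction l, anzahl, i using ersetzeLoop.induct with
  | case1 l anzahl i h element heq ih =>
      rw [ersetzeLoop]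
      simp only [h, dif_pos, element, heq, if_pos]
      rw [ih]
      have hdrop : (l.set i 16).drop (i + 1) = l.drop (i + 1) :=
        List.drop_set_of_lt (Nat.lt_succ_self i)
      rw [hdrop]
      have : l.drop i = l[i] :: l.drop (i + 1) := List.drop_eq_getElem_cons h
      rw [this, List.count_cons]
      have h8 : l[i] = 8 := by simpa [element] using heq
      simp [h8]
      push_cast
      ring
  | case2 l anzahl i h element heq ih =>
      rw [ersetzeLoop]
      simp only [h, dif_pos]
      rw [if_neg (by simpa [element] using heq)]
      rw [ih]
      have : l.drop i = l[i] :: l.drop (i + 1) := List.drop_eq_getElem_cons h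
      rw [this, List.count_cons]
      have h8 : ¬ l[i] = 8 := by simpa [element] using heq
      simp [h8]
  | case3 l anzahl i h =>
      rw [ersetzeLoop]
      simp only [h]
      have : l.drop i = [] := List.drop_eq_nil_of_le (Nat.le_of_not_lt h)
      simp [this]

-- ===== VERDICT (by name: the statement is the Claim_ definition above) =====
theorem ersetze_spec : Claim_equal_ersetze := by
  intro liste _
  unfold Spec_ersetze ersetze ersetze_alt
  rw [ersetzeLoop_eq]
  simp [PySem.List.count_eq]
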